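-- pv_equiv track=rewrite | github.com/elifesciences-publications/vacv-ont-manuscript | sb.py | count
-- ===== SOURCE A (Python) =====
-- def count(arrays, cn):
--     """
--     Used in conjuction with `get_vals`.
--     Counts the proportions of all_wt, all_mut,
--     or mixed arrays in a given set of `data`,
--     up to a copy number of `cn`.
--     """
--     all_wt, all_mut, mixed = 0, 0, 0
--     for array in arrays:
--         if len(array) != cn: continue
--         # homogenous WT
--         if all([i == 0 for i in array]): all_wt += 1
--         # homogenous H47R
--         elif all([i == 1 for i in array]): all_mut += 1
--         # "mixed" -- requires array to be longer than 1 copy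
--         elif len(set(array)) > 1 and all([i in (0, 1) for i in array]):
--             mixed += 1
--     return all_wt, mixed, all_mut
-- ===== SOURCE B (Python) =====
-- def count(arrays, cn):
--     # Histogram arrays of length cn by their (min, max) pair, then read the
--     # three classes off the table: (0,0)=all-wt, (0,1)=mixed 0/1, (1,1)=all-mut.
--     tally = {}
--     for a in arrays:
--         if len(a) == cn:
--             key = (min(a), max(a)) if a else (0, 0)
--             tally[key] = tally.get(key, 0) + 1
--     return tally.get((0, 0), 0), tally.get((0, 1), 0), tally.get((1, 1), 0)
-- ===== Notes on version B (the rewrite author's own statement) =====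
-- stated objective: alternative
-- what changed: B builds a dict histogram keyed by each length-cn array's (min, max) pair and reads the three counts off the table afterwards, replacing A's per-array chain of three all(...) scans and three running counters.
import Mathlib
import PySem

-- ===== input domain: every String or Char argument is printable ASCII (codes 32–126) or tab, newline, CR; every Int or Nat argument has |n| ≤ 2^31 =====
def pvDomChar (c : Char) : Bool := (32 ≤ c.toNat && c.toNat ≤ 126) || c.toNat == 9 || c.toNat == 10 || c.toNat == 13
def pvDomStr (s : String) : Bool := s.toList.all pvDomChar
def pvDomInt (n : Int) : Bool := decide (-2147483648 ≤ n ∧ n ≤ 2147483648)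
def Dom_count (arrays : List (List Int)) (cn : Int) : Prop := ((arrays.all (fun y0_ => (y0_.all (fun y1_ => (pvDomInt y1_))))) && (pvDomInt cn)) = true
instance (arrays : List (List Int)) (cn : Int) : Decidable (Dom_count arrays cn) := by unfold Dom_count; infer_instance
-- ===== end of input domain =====

-- B histograms arrays of length cn by their (min, max) pair in a dict and reads the three
-- class counts off the table; A keeps three counters updated by chains of all(...) scans.

-- ===== PORT A =====
def count (arrays : List (List Int)) (cn : Int) : Int × Int × Int :=
  let st := arrays.foldl (fun (st : Int × Int × Int) array =>
    match st with
    | (all_wt, all_mut, mixed) =>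
      if (array.length : Int) ≠ cn then (all_wt, all_mut, mixed)
      else if array.all (fun i => i == 0) then (all_wt + 1, all_mut, mixed)
      else if array.all (fun i => i == 1) then (all_wt, all_mut + 1, mixed)
      else if decide (1 < (PySem.Set.ofList array).length) && array.all (fun i => i == 0 || i == 1) then
        (all_wt, all_mut, mixed + 1)
      else (all_wt, all_mut, mixed)) (0, 0, 0)
  (st.1, st.2.2, st.2.1)

-- ===== PORT B =====
-- key = (min(a), max(a)) if a else (0, 0)
def keyOf (a : List Int) : Int × Int :=
  if a.isEmpty then (0, 0)
  else ((PySem.List.min? a (fun x => x)).getD 0, (PySem.List.max? a (fun x => x)).getD 0)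

def count_alt (arrays : List (List Int)) (cn : Int) : Int × Int × Int :=
  let tally := arrays.foldl (fun (t : PySem.Dict (Int × Int) Int) a =>
    if (a.length : Int) = cn then
      let key := keyOf a
      t.insert key (t.getD key 0 + 1)
    else t) PySem.Dict.empty
  (tally.getD (0, 0) 0, tally.getD (0, 1) 0, tally.getD (1, 1) 0)

-- ===== PRECONDITION & SPEC =====
def Spec_count (arrays : List (List Int)) (cn : Int) (out : Int × Int × Int) : Prop := out = count_alt arrays cn
instance (arrays : List (List Int)) (cn : Int) (out : Int × Int × Int) : Decidable (Spec_count arrays cn out) := by unfold Spec_count; infer_instance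

-- ===== CLAIM (what is proved, stated in full; the proofs are below) =====
def Claim_equal_count : Prop := ∀ (arrays : List (List Int)) (cn : Int), Dom_count arrays cn → Spec_count arrays cn (count arrays cn)

-- ===== LEMMAS AND PROOFS =====

-- B'''s tally lookup counts exactly the arrays of length cn with that key
lemma tally_getD (arrays : List (List Int)) (cn : Int) (k : Int × Int) :
    ∀ d : PySem.Dict (Int × Int) Int,
      (arrays.foldl (fun (t : PySem.Dict (Int × Int) Int) a =>
        if (a.length : Int) = cn then t.insert (keyOf a) (t.getD (keyOf a) 0 + 1)
        else t) d).getD k 0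
      = d.getD k 0 + (arrays.countP (fun a => decide ((a.length : Int) = cn) && (keyOf a == k)) : Int) := by
  induction arrays with
  | nil => intro d; simp
  | cons a rest ih =>
    intro d
    rw [List.foldl_cons, List.countP_cons]
    by_cases hlen : (a.length : Int) = cn
    · simp only [hlen, if_pos, decide_true, Bool.true_and]
      rw [ih]
      by_cases hk : keyOf a = k
      · rw [hk, PySem.Dict.getD_insert, if_pos rfl]
        simp only [beq_self_eq_true, if_pos]
        push_cast
        omega
      · rw [PySem.Dict.getD_insert, if_neg (fun h => hk h.symm)]
        simp [hk]
    · rw [if_neg hlen, ih]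
      simp [hlen]

lemma keyOf_cons (x : Int) (t : List Int) :
    keyOf (x :: t) = (t.foldl min x, t.foldl max x) := by
  unfold keyOf
  rw [if_neg (by simp), PySem.List.min?_id_cons, PySem.List.max?_id_cons]
  rfl

lemma bounds_of_mem (x : Int) (t : List Int) (y : Int) (hy : y ∈ x :: t) :
    t.foldl min x ≤ y ∧ y ≤ t.foldl max x := by
  rcases List.mem_cons.mp hy with rfl | hy
  · exact ⟨(PySem.List.foldl_min_le t y).1, (PySem.List.le_foldl_max t y).1⟩
  · exact ⟨(PySem.List.foldl_min_le t x).2 y hy, (PySem.List.le_foldl_max t x).2 y hy⟩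

lemma foldl_min_mem' (x : Int) (t : List Int) : t.foldl min x ∈ x :: t := by
  rcases PySem.List.foldl_min_mem t x with h | h
  · rw [h]; exact List.mem_cons_self
  · exact List.mem_cons_of_mem _ h

lemma foldl_max_mem' (x : Int) (t : List Int) : t.foldl max x ∈ x :: t := by
  rcases PySem.List.foldl_max_mem t x with h | h
  · rw [h]; exact List.mem_cons_self
  · exact List.mem_cons_of_mem _ h

lemma keyOf_zero_iff (a : List Int) :
    (keyOf a = (0, 0)) ↔ (a.all (fun i => i == 0) = true) := by
  cases a with
  | nil => simp [keyOf]
  | cons x t =>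
    rw [keyOf_cons, Prod.mk.injEq, List.all_eq_true]
    constructor
    · rintro ⟨hm, hM⟩ y hy
      have := bounds_of_mem x t y hy
      rw [hm, hM] at this
      simp only [beq_iff_eq]
      omega
    · intro h
      have hm := h _ (foldl_min_mem' x t)
      have hM := h _ (foldl_max_mem' x t)
      simp only [beq_iff_eq] at hm hM
      exact ⟨hm, hM⟩

lemma keyOf_one_iff (a : List Int) :
    (keyOf a = (1, 1)) ↔ (a ≠ [] ∧ a.all (fun i => i == 1) = true) := by
  cases a with
  | nil => simp [keyOf]
  | cons x t =>
    rw [keyOf_cons, Prod.mk.injEq, List.all_eq_true]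
    constructor
    · rintro ⟨hm, hM⟩
      refine ⟨by simp, fun y hy => ?_⟩
      have := bounds_of_mem x t y hy
      rw [hm, hM] at this
      simp only [beq_iff_eq]
      omega
    · rintro ⟨-, h⟩
      have hm := h _ (foldl_min_mem' x t)
      have hM := h _ (foldl_max_mem' x t)
      simp only [beq_iff_eq] at hm hM
      exact ⟨hm, hM⟩

lemma keyOf_mixed_iff (a : List Int) :
    (keyOf a = (0, 1)) ↔ ((0 : Int) ∈ a ∧ (1 : Int) ∈ a ∧ a.all (fun i => i == 0 || i == 1) = true) := by
  cases a with
  | nil => simp [keyOf]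
  | cons x t =>
    rw [keyOf_cons, Prod.mk.injEq, List.all_eq_true]
    constructor
    · rintro ⟨hm, hM⟩
      refine ⟨hm ▸ foldl_min_mem' x t, hM ▸ foldl_max_mem' x t, fun y hy => ?_⟩
      have := bounds_of_mem x t y hy
      rw [hm, hM] at this
      simp only [beq_iff_eq, Bool.or_eq_true]
      omega
    · rintro ⟨h0, h1, h⟩
      have hm := bounds_of_mem x t 0 h0
      have hM := bounds_of_mem x t 1 h1
      have hm' := h _ (foldl_min_mem' x t)
      have hM' := h _ (foldl_max_mem' x t)
      simp only [beq_iff_eq, Bool.or_eq_true] at hm' hM'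
      constructor <;> omega

-- A's running counters equal countP of the three branch predicates
def pA (cn : Int) (a : List Int) : Bool :=
  decide ((a.length : Int) = cn) && a.all (fun i => i == 0)
def pB (cn : Int) (a : List Int) : Bool :=
  decide ((a.length : Int) = cn) && !a.all (fun i => i == 0) && a.all (fun i => i == 1)
def pC (cn : Int) (a : List Int) : Bool :=
  decide ((a.length : Int) = cn) && !a.all (fun i => i == 0) && !a.all (fun i => i == 1) &&
    (decide (1 < (PySem.Set.ofList a).length) && a.all (fun i => i == 0 || i == 1))

lemma count_fold (arrays : List (List Int)) (cn : Int) :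
    ∀ w mu mx : Int,
      arrays.foldl (fun (st : Int × Int × Int) array =>
        match st with
        | (all_wt, all_mut, mixed) =>
          if (array.length : Int) ≠ cn then (all_wt, all_mut, mixed)
          else if array.all (fun i => i == 0) then (all_wt + 1, all_mut, mixed)
          else if array.all (fun i => i == 1) then (all_wt, all_mut + 1, mixed)
          else if decide (1 < (PySem.Set.ofList array).length) && array.all (fun i => i == 0 || i == 1) then
            (all_wt, all_mut, mixed + 1)
          else (all_wt, all_mut, mixed)) (w, mu, mx)
      = (w + (arrays.countP (pA cn) : Int), mu + (arrays.countP (pB cn) : Int),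
         mx + (arrays.countP (pC cn) : Int)) := by
  induction arrays with
  | nil => intro w mu mx; simp
  | cons a rest ih =>
    intro w mu mx
    rw [List.foldl_cons]
    simp only [List.countP_cons]
    by_cases hlen : (a.length : Int) = cn
    · rw [if_neg (not_not_intro hlen)]
      by_cases h0 : a.all (fun i => i == 0) = true
      · rw [if_pos h0, ih]
        simp [pA, pB, pC, hlen, h0]
        omega
      · rw [if_neg h0]
        by_cases h1 : a.all (fun i => i == 1) = true
        · rw [if_pos h1, ih]
          simp [pA, pB, pC, hlen, h0, h1]
          omega
        · rw [if_neg h1]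
          by_cases h2 : (decide (1 < (PySem.Set.ofList a).length) && a.all (fun i => i == 0 || i == 1)) = true
          · rw [if_pos h2, ih]
            simp [pA, pB, pC, hlen, h0, h1, h2]
            omega
          · rw [if_neg h2, ih]
            simp [pA, pB, pC, hlen, h0, h1, h2]
    · rw [if_pos hlen, ih]
      simp [pA, pB, pC, hlen]

-- the three key predicates coincide with A's branch predicates
lemma key_zero_eq (cn : Int) (a : List Int) :
    (decide ((a.length : Int) = cn) && (keyOf a == (0, 0))) = pA cn a := by
  unfold pA
  by_cases hlen : (a.length : Int) = cn
  · simp only [hlen, decide_true, Bool.true_and]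
    rw [Bool.eq_iff_iff, beq_iff_eq, keyOf_zero_iff]
  · simp [hlen]

lemma key_one_eq (cn : Int) (a : List Int) :
    (decide ((a.length : Int) = cn) && (keyOf a == (1, 1))) = pB cn a := by
  unfold pB
  by_cases hlen : (a.length : Int) = cn
  · simp only [hlen, decide_true, Bool.true_and]
    rw [Bool.eq_iff_iff, beq_iff_eq, keyOf_one_iff, Bool.and_eq_true, Bool.not_eq_true',
        List.all_eq_true, List.all_eq_false]
    constructor
    · rintro ⟨hne, h1⟩
      obtain ⟨y, hy⟩ := List.exists_mem_of_ne_nil a hne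
      refine ⟨⟨y, hy, ?_⟩, h1⟩
      have := h1 y hy
      simp only [beq_iff_eq] at this ⊢
      omega
    · rintro ⟨⟨y, hy, -⟩, h1⟩
      exact ⟨List.ne_nil_of_mem hy, h1⟩
  · simp [hlen]

lemma mem_of_not_all_of_all01 (a : List Int)
    (hall : ∀ y ∈ a, y = 0 ∨ y = 1) (h0 : ¬ ∀ y ∈ a, y = 0) : (1 : Int) ∈ a := by
  obtain ⟨y, hy'⟩ := not_forall.mp h0
  obtain ⟨hy, hy0⟩ := Classical.not_imp.mp hy' 
  rcases hall y hy with rfl | rfl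
  · exact absurd rfl hy0
  · exact hy

lemma key_mixed_eq (cn : Int) (a : List Int) :
    (decide ((a.length : Int) = cn) && (keyOf a == (0, 1))) = pC cn a := by
  unfold pC
  by_cases hlen : (a.length : Int) = cn
  · simp only [hlen, decide_true, Bool.true_and]
    rw [Bool.eq_iff_iff, beq_iff_eq, keyOf_mixed_iff]
    simp only [Bool.and_eq_true, Bool.not_eq_true', List.all_eq_false, List.all_eq_true,
      decide_eq_true_iff, beq_iff_eq, Bool.or_eq_true]
    constructor
    · rintro ⟨h0, h1, hall⟩
      have hne01 : (0 : Int) ≠ 1 := by omega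
      refine ⟨⟨⟨1, h1, by omega⟩, ⟨0, h0, by omega⟩⟩, ?_, hall⟩
      have m0 : (0 : Int) ∈ PySem.Set.ofList a := (PySem.Set.mem_ofList a 0).mpr h0
      have m1 : (1 : Int) ∈ PySem.Set.ofList a := (PySem.Set.mem_ofList a 1).mpr h1
      cases hs : PySem.Set.ofList a with
      | nil => rw [hs] at m0; exact absurd m0 (List.not_mem_nil)
      | cons b t =>
        cases t with
        | nil =>
          rw [hs] at m0 m1
          have e0 := List.mem_singleton.mp m0
          have e1 := List.mem_singleton.mp m1
          omega
        | cons c t' => simp only [List.length_cons]; omega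
    · rintro ⟨⟨⟨y, hy, hy0⟩, ⟨z, hz, hz1⟩⟩, -, hall⟩
      have hall' : ∀ y ∈ a, y = 0 ∨ y = 1 := fun y hy => hall y hy
      have h1 : (1 : Int) ∈ a := by
        refine mem_of_not_all_of_all01 a hall' ?_
        intro h; exact hy0 (h y hy)
      have h0 : (0 : Int) ∈ a := by
        rcases hall' z hz with rfl | rfl
        · exact hz
        · exact absurd rfl hz1
      exact ⟨h0, h1, hall⟩
  · simp [hlen]

-- ===== VERDICT (by name: the statement is the Claim_ definition above) =====
theorem count_spec : Claim_equal_count := by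
  intro arrays cn _
  show count arrays cn = count_alt arrays cn
  have hB : count_alt arrays cn =
      ((arrays.foldl (fun (t : PySem.Dict (Int × Int) Int) a =>
          if (a.length : Int) = cn then t.insert (keyOf a) (t.getD (keyOf a) 0 + 1)
          else t) PySem.Dict.empty).getD (0, 0) 0,
       (arrays.foldl (fun (t : PySem.Dict (Int × Int) Int) a =>
          if (a.length : Int) = cn then t.insert (keyOf a) (t.getD (keyOf a) 0 + 1)
          else t) PySem.Dict.empty).getD (0, 1) 0,
       (arrays.foldl (fun (t : PySem.Dict (Int × Int) Int) a =>
          if (a.length : Int) = cn then t.insert (keyOf a) (t.getD (keyOf a) 0 + 1)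
          else t) PySem.Dict.empty).getD (1, 1) 0) := rfl
  have hA : count arrays cn =
      (fun st : Int × Int × Int => (st.1, st.2.2, st.2.1))
        (arrays.foldl (fun (st : Int × Int × Int) array =>
          match st with
          | (all_wt, all_mut, mixed) =>
            if (array.length : Int) ≠ cn then (all_wt, all_mut, mixed)
            else if array.all (fun i => i == 0) then (all_wt + 1, all_mut, mixed)
            else if array.all (fun i => i == 1) then (all_wt, all_mut + 1, mixed)
            else if decide (1 < (PySem.Set.ofList array).length) && array.all (fun i => i == 0 || i == 1) then
              (all_wt, all_mut, mixed + 1)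
            else (all_wt, all_mut, mixed)) (0, 0, 0)) := rfl
  rw [hA, count_fold arrays cn 0 0 0, hB,
      tally_getD arrays cn (0, 0) PySem.Dict.empty,
      tally_getD arrays cn (0, 1) PySem.Dict.empty,
      tally_getD arrays cn (1, 1) PySem.Dict.empty]
  simp only [PySem.Dict.getD_empty]
  rw [funext (key_zero_eq cn), funext (key_mixed_eq cn), funext (key_one_eq cn)]
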